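-- pv_equiv track=rewrite | github.com/mmalhotra/fast-autocomplete | fast_autocomplete/dwg_old.py | get_prefixes_from_list
-- ===== SOURCE A (Python) =====
-- def common_prefix(a, b):
--     _common = []
--     for i in range(min(len(a), len(b))):
--         if a[i] == b[i]:
--             _common.append(a[i])
--         else:
--             break
--     return "".join(_common)
--
-- def get_prefixes_from_list(word, prefixes, start, end):
--     results = []
--     if start > end:
--         return results
--     middle = int((start + end) / 2)
--     mword = prefixes[middle]
--     go_left, go_right = (False, False)
--     pref_mword = common_prefix(word, mword)
--     if pref_mword == mword:
--         results.append(middle)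
--         go_left, go_right = (True, True)
--     else:
--         prob_prefix = 0
--         min_word = prefixes[start]
--         max_word = prefixes[end]
--         pref_min_word = common_prefix(word, min_word)
--         pref_max_word = common_prefix(word, max_word)
--         if min_word <= pref_min_word <= mword:
--             go_left = True
--         if min_word <= pref_min_word + word[len(pref_min_word):len(pref_min_word) + 1] <= mword:
--             go_left = True
--         if min_word <= pref_mword <= mword:
--             go_left = True
--         if min_word <= pref_mword + word[len(pref_mword):len(pref_mword) + 1] <= mword:
--             go_left = True
--         if max_word >= pref_max_word >= mword:
--             go_right = True
--         if max_word >= pref_max_word + word[len(pref_max_word):len(pref_max_word) + 1] >= mword: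
--             go_right = True
--         if max_word >= pref_mword >= mword:
--             go_right = True
--         if max_word >= pref_mword + word[len(pref_mword):len(pref_mword) + 1] >= mword:
--             go_right = True
--     if go_left:
--         results.extend(get_prefixes_from_list(word, prefixes, start, middle - 1))
--     if go_right:
--         results.extend(get_prefixes_from_list(word, prefixes, middle + 1, end))
--     return results
-- ===== SOURCE B (Python) =====
-- def common_prefix(a, b):
--     _common = []
--     for i in range(min(len(a), len(b))):
--         if a[i] == b[i]:
--             _common.append(a[i])
--         else:
--             break
--     return "".join(_common)
--
--
-- def _visit(word, prefixes, start, end):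
--     """Evaluate one range's node: returns (middle, found, go_left, go_right)."""
--     middle = int((start + end) / 2)
--     mword = prefixes[middle]
--     pref_mword = common_prefix(word, mword)
--     if pref_mword == mword:
--         return middle, True, True, True
--     go_left = go_right = False
--     min_word = prefixes[start]
--     max_word = prefixes[end]
--     pref_min_word = common_prefix(word, min_word)
--     pref_max_word = common_prefix(word, max_word)
--     if min_word <= pref_min_word <= mword:
--         go_left = True
--     if min_word <= pref_min_word + word[len(pref_min_word):len(pref_min_word) + 1] <= mword:
--         go_left = True
--     if min_word <= pref_mword <= mword:
--         go_left = True
--     if min_word <= pref_mword + word[len(pref_mword):len(pref_mword) + 1] <= mword: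
--         go_left = True
--     if max_word >= pref_max_word >= mword:
--         go_right = True
--     if max_word >= pref_max_word + word[len(pref_max_word):len(pref_max_word) + 1] >= mword:
--         go_right = True
--     if max_word >= pref_mword >= mword:
--         go_right = True
--     if max_word >= pref_mword + word[len(pref_mword):len(pref_mword) + 1] >= mword:
--         go_right = True
--     return middle, False, go_left, go_right
--
--
-- def get_prefixes_from_list(word, prefixes, start, end):
--     results = []
--     stack = [(start, end)]
--     while stack:
--         s, e = stack.pop()
--         if s > e:
--             continue
--         middle, found, go_left, go_right = _visit(word, prefixes, s, e)
--         if found: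
--             results.append(middle)
--         if go_right:
--             stack.append((middle + 1, e))
--         if go_left:
--             stack.append((s, middle - 1))
--     return results
-- ===== Notes on version B (the rewrite author's own statement) =====
-- stated objective: alternative
-- what changed: Replaced the double recursion by a single iterative loop over an explicit stack of (start, end) ranges, popped in preorder (middle appended at visit time, right range pushed before left), with the node evaluation factored into one helper; the comparison conditions are kept verbatim.
import Mathlib
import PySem

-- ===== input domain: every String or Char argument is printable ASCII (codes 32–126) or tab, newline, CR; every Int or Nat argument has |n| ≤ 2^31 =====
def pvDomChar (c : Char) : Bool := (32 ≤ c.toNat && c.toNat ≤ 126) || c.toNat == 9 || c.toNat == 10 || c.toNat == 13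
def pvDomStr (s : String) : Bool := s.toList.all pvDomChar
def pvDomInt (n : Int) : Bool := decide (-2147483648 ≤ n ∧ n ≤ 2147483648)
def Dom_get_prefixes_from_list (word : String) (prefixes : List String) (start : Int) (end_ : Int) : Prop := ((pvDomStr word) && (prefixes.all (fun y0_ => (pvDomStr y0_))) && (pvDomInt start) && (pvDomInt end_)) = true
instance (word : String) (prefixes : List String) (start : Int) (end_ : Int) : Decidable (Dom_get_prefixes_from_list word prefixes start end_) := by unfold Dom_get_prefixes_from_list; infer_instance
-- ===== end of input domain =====

-- B replaces A's double recursion by ONE iterative loop over an explicit stack of (start, end)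
-- ranges popped in preorder (middle appended at visit time, right range pushed before left, node
-- evaluation factored into a helper); the comparison conditions are kept verbatim (objective: alternative).

-- ===== PORT A =====
-- common_prefix: the for-loop with break becomes structural recursion on the two char lists
-- (exact: compares code points pairwise, stops at the first mismatch or shorter string).
def commonPrefixChars : List Char → List Char → List Char
  | a :: as, b :: bs => if a = b then a :: commonPrefixChars as bs else []
  | _, _ => []

-- Python's  x <= y  on str (code-point lexicographic): total order, so x <= y  iff  not (y < x).
def pvStrLe (x y : List Char) : Bool := !(PySem.Chars.strLt y x)

-- Python's  p + word[len(p):len(p)+1]  (the slice is exact via PySem.List.slice on code points).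
def pvNextSlice (word p : List Char) : List Char :=
  p ++ PySem.List.slice word (some (p.length : Int)) (some ((p.length : Int) + 1))

-- midpoint bounds for  middle = int((start+end)/2)  — cited by both ports' decreasing_by
theorem pvMidBounds (s e : Int) (h : s ≤ e) :
    s ≤ PySem.Int.truncdiv (s + e) 2 ∧ PySem.Int.truncdiv (s + e) 2 ≤ e := by
  show s ≤ (s + e).tdiv 2 ∧ (s + e).tdiv 2 ≤ e
  by_cases h0 : 0 ≤ s + e
  · rw [Int.tdiv_eq_ediv_of_nonneg h0]; omega
  · have h1 : (s + e).tdiv 2 = -((-(s + e)).tdiv 2) := by rw [Int.neg_tdiv]; ring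
    rw [h1, Int.tdiv_eq_ediv_of_nonneg (by omega)]; omega

theorem pvDecA₁ (start end_ : Int) (h : ¬ start > end_) :
    (PySem.Int.truncdiv (start + end_) 2 - 1 - start + 1).toNat < (end_ - start + 1).toNat := by
  have := pvMidBounds start end_ (by omega); omega

theorem pvDecA₂ (start end_ : Int) (h : ¬ start > end_) :
    (end_ - (PySem.Int.truncdiv (start + end_) 2 + 1) + 1).toNat < (end_ - start + 1).toNat := by
  have := pvMidBounds start end_ (by omega); omega

-- A's recursive function; string comparisons/slices go through the code-point (List Char) versions.
-- int((start+end)/2) is exact truncating division here (|start+end| ≤ 2^32 < 2^53).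
-- Where Python raises IndexError (pyGet? = none) the port returns [] / sets no flags: those
-- inputs are exactly the ones excluded by Pre_.
def get_prefixes_from_list (word : String) (prefixes : List String) (start : Int) (end_ : Int) : List Int :=
  if h : start > end_ then []
  else
    let middle := PySem.Int.truncdiv (start + end_) 2
    match PySem.List.pyGet? prefixes middle with
    | none => []  -- prefixes[middle] raises IndexError; outside Pre_
    | some mword =>
      let pref_mword := commonPrefixChars word.toList mword.toList
      if pref_mword = mword.toList then
        -- results = [middle]; go_left, go_right = True, True
        middle :: (get_prefixes_from_list word prefixes start (middle - 1)
                    ++ get_prefixes_from_list word prefixes (middle + 1) end_)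
      else
        match PySem.List.pyGet? prefixes start, PySem.List.pyGet? prefixes end_ with
        | some min_word, some max_word =>
          let pref_min_word := commonPrefixChars word.toList min_word.toList
          let pref_max_word := commonPrefixChars word.toList max_word.toList
          let go_left :=
            (pvStrLe min_word.toList pref_min_word && pvStrLe pref_min_word mword.toList)
            || (pvStrLe min_word.toList (pvNextSlice word.toList pref_min_word) && pvStrLe (pvNextSlice word.toList pref_min_word) mword.toList)
            || (pvStrLe min_word.toList pref_mword && pvStrLe pref_mword mword.toList)
            || (pvStrLe min_word.toList (pvNextSlice word.toList pref_mword) && pvStrLe (pvNextSlice word.toList pref_mword) mword.toList)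
          let go_right :=
            (pvStrLe pref_max_word max_word.toList && pvStrLe mword.toList pref_max_word)
            || (pvStrLe (pvNextSlice word.toList pref_max_word) max_word.toList && pvStrLe mword.toList (pvNextSlice word.toList pref_max_word))
            || (pvStrLe pref_mword max_word.toList && pvStrLe mword.toList pref_mword)
            || (pvStrLe (pvNextSlice word.toList pref_mword) max_word.toList && pvStrLe mword.toList (pvNextSlice word.toList pref_mword))
          (if go_left then get_prefixes_from_list word prefixes start (middle - 1) else [])
            ++ (if go_right then get_prefixes_from_list word prefixes (middle + 1) end_ else [])
        | _, _ => []  -- prefixes[start] / prefixes[end] raises IndexError; outside Pre_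
termination_by (end_ - start + 1).toNat
decreasing_by
  all_goals first
  | exact pvDecA₁ start end_ h
  | exact pvDecA₂ start end_ h

-- ===== PORT B =====
-- _visit: evaluates one node; returns (middle, found, go_left, go_right).
-- The three list accesses are done by pyGet? + isSome/get (no pattern match); where Python's
-- _visit raises IndexError (a lookup is none) the flags stay false: those inputs are outside Pre_.
def pvVisit (word : String) (prefixes : List String) (start end_ : Int) : Int × Bool × Bool × Bool :=
  let middle := PySem.Int.truncdiv (start + end_) 2
  let mo := PySem.List.pyGet? prefixes middle
  if hm : mo.isSome then
    let mword := mo.get hm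
    let pref_mword := commonPrefixChars word.toList mword.toList
    if pref_mword = mword.toList then (middle, true, true, true)
    else
      let so := PySem.List.pyGet? prefixes start
      let eo := PySem.List.pyGet? prefixes end_
      if hs : so.isSome then
        if he : eo.isSome then
          let min_word := so.get hs
          let max_word := eo.get he
          let pref_min_word := commonPrefixChars word.toList min_word.toList
          let pref_max_word := commonPrefixChars word.toList max_word.toList
          let go_left :=
            (pvStrLe min_word.toList pref_min_word && pvStrLe pref_min_word mword.toList)
            || (pvStrLe min_word.toList (pvNextSlice word.toList pref_min_word) && pvStrLe (pvNextSlice word.toList pref_min_word) mword.toList)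
            || (pvStrLe min_word.toList pref_mword && pvStrLe pref_mword mword.toList)
            || (pvStrLe min_word.toList (pvNextSlice word.toList pref_mword) && pvStrLe (pvNextSlice word.toList pref_mword) mword.toList)
          let go_right :=
            (pvStrLe pref_max_word max_word.toList && pvStrLe mword.toList pref_max_word)
            || (pvStrLe (pvNextSlice word.toList pref_max_word) max_word.toList && pvStrLe mword.toList (pvNextSlice word.toList pref_max_word))
            || (pvStrLe pref_mword max_word.toList && pvStrLe mword.toList pref_mword)
            || (pvStrLe (pvNextSlice word.toList pref_mword) max_word.toList && pvStrLe mword.toList (pvNextSlice word.toList pref_mword))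
          (middle, false, go_left, go_right)
        else (middle, false, false, false)  -- prefixes[end] raises IndexError; outside Pre_
      else (middle, false, false, false)  -- prefixes[start] raises IndexError; outside Pre_
  else (middle, false, false, false)  -- prefixes[middle] raises IndexError; outside Pre_

theorem pvVisit_fst (word : String) (prefixes : List String) (start end_ : Int) :
    (pvVisit word prefixes start end_).1 = PySem.Int.truncdiv (start + end_) 2 := by
  unfold pvVisit
  dsimp only
  repeat' split
  all_goals rfl

-- cost of one stack entry, for the loop's termination measure
def pvCost (q : Int × Int) : Nat := 2 * (q.2 - q.1 + 1).toNat + 1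

theorem pvDecB₁ (s e : Int) (stack : List (Int × Int)) :
    (stack.map pvCost).sum < (((s, e) :: stack).map pvCost).sum := by
  simp [pvCost]

theorem pvDecB₂ (word : String) (prefixes : List String) (s e : Int) (stack : List (Int × Int)) (h : ¬ s > e) :
    (((if (pvVisit word prefixes s e).2.2.1 then (s, (pvVisit word prefixes s e).1 - 1) :: (if (pvVisit word prefixes s e).2.2.2 then ((pvVisit word prefixes s e).1 + 1, e) :: stack else stack) else (if (pvVisit word prefixes s e).2.2.2 then ((pvVisit word prefixes s e).1 + 1, e) :: stack else stack))).map pvCost).sum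
      < (((s, e) :: stack).map pvCost).sum := by
  have hm := pvMidBounds s e (by omega)
  rw [← pvVisit_fst word prefixes s e] at hm
  split <;> split <;> simp only [List.map_cons, List.sum_cons, pvCost] <;> omega

-- the while loop over the explicit stack (pop = head; push right then left)
def gpB (word : String) (prefixes : List String) : List (Int × Int) → List Int → List Int
  | [], results => results
  | (s, e) :: stack, results =>
    if h : s > e then gpB word prefixes stack results
    else
      let v := pvVisit word prefixes s e
      let results' := if v.2.1 then results ++ [v.1] else results
      let stack₁ := if v.2.2.2 then (v.1 + 1, e) :: stack else stack
      let stack₂ := if v.2.2.1 then (s, v.1 - 1) :: stack₁ else stack₁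
      gpB word prefixes stack₂ results'
termination_by stack _ => (stack.map pvCost).sum
decreasing_by
  · exact pvDecB₁ s e stack
  · exact pvDecB₂ word prefixes s e stack h

def get_prefixes_from_list_alt (word : String) (prefixes : List String) (start : Int) (end_ : Int) : List Int :=
  gpB word prefixes [(start, end_)] []

-- ===== PRECONDITION & SPEC =====
-- Pre_ excludes exactly the inputs on which Python A raises IndexError: a non-empty range
-- whose endpoints are not all valid (possibly negative) indices into prefixes.
def Pre_get_prefixes_from_list (word : String) (prefixes : List String) (start : Int) (end_ : Int) : Prop :=
  start > end_ ∨ (-(prefixes.length : Int) ≤ start ∧ end_ < (prefixes.length : Int))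
instance (word : String) (prefixes : List String) (start : Int) (end_ : Int) : Decidable (Pre_get_prefixes_from_list word prefixes start end_) := by unfold Pre_get_prefixes_from_list; infer_instance

def pvWitness_get_prefixes_from_list : String × List String × Int × Int := ("ab", ["a", "ab", "b"], 0, 2)

def Spec_get_prefixes_from_list (word : String) (prefixes : List String) (start : Int) (end_ : Int) (out : List Int) : Prop := out = get_prefixes_from_list_alt word prefixes start end_
instance (word : String) (prefixes : List String) (start : Int) (end_ : Int) (out : List Int) : Decidable (Spec_get_prefixes_from_list word prefixes start end_ out) := by unfold Spec_get_prefixes_from_list; infer_instance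

-- ===== CLAIM (what is proved, stated in full; the proofs are below) =====
def Claim_equal_get_prefixes_from_list : Prop := ∀ (word : String) (prefixes : List String) (start : Int) (end_ : Int), Dom_get_prefixes_from_list word prefixes start end_ → Pre_get_prefixes_from_list word prefixes start end_ → Spec_get_prefixes_from_list word prefixes start end_ (get_prefixes_from_list word prefixes start end_)

-- ===== LEMMAS AND PROOFS =====

-- one step of A, phrased through pvVisit (A computes the identical middle and flags)
theorem gpA_visit (word : String) (prefixes : List String) (s e : Int) (h : ¬ s > e) :
    get_prefixes_from_list word prefixes s e =
      (if (pvVisit word prefixes s e).2.1 then [(pvVisit word prefixes s e).1] else [])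
      ++ (if (pvVisit word prefixes s e).2.2.1 then get_prefixes_from_list word prefixes s ((pvVisit word prefixes s e).1 - 1) else [])
      ++ (if (pvVisit word prefixes s e).2.2.2 then get_prefixes_from_list word prefixes ((pvVisit word prefixes s e).1 + 1) e else []) := by
  rw [get_prefixes_from_list.eq_def, pvVisit.eq_def, dif_neg h]
  cases hm : PySem.List.pyGet? prefixes (PySem.Int.truncdiv (s + e) 2) <;> simp only [hm]
  · simp
  case some mword =>
    by_cases hpm : commonPrefixChars word.toList mword.toList = mword.toList
    · simp [hpm]
    · simp only [if_neg hpm, Option.get_some, Option.isSome_some]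
      cases hs : PySem.List.pyGet? prefixes s <;> cases he : PySem.List.pyGet? prefixes e <;>
        simp

theorem gpA_empty (word : String) (prefixes : List String) (s e : Int) (h : s > e) :
    get_prefixes_from_list word prefixes s e = [] := by
  rw [get_prefixes_from_list.eq_def, dif_pos h]

-- loop invariant: running the stack machine appends exactly A's recursive results, in order
theorem gpB_eq (word : String) (prefixes : List String) :
    ∀ (n : Nat) (stack : List (Int × Int)) (results : List Int),
      (stack.map pvCost).sum ≤ n →
      gpB word prefixes stack results
        = results ++ stack.flatMap (fun q => get_prefixes_from_list word prefixes q.1 q.2) := by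
  intro n
  induction n with
  | zero =>
    intro stack results h
    cases stack with
    | nil => simp [gpB]
    | cons q rest => simp [pvCost, List.map_cons, List.sum_cons] at h
  | succ n ih =>
    intro stack results h
    cases stack with
    | nil => simp [gpB]
    | cons q rest =>
      obtain ⟨s, e⟩ := q
      by_cases hse : s > e
      · rw [gpB, dif_pos hse, ih rest results (by simp [pvCost] at h ⊢; omega)]
        simp [gpA_empty word prefixes s e hse]
      · rw [gpB, dif_neg hse]
        have hm := pvMidBounds s e (by omega)
        rw [← pvVisit_fst word prefixes s e] at hm
        have h' : 2 * (e - s + 1).toNat + 1 + (rest.map pvCost).sum ≤ n + 1 := by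
          simp only [List.map_cons, List.sum_cons, pvCost] at h; omega
        have hrest : (((if (pvVisit word prefixes s e).2.2.1 then (s, (pvVisit word prefixes s e).1 - 1) :: (if (pvVisit word prefixes s e).2.2.2 then ((pvVisit word prefixes s e).1 + 1, e) :: rest else rest) else (if (pvVisit word prefixes s e).2.2.2 then ((pvVisit word prefixes s e).1 + 1, e) :: rest else rest))).map pvCost).sum ≤ n := by
          split <;> split <;> (try simp only [List.map_cons, List.sum_cons, pvCost]) <;> omega
        rw [ih _ _ hrest]
        rw [List.flatMap_cons, gpA_visit word prefixes s e hse]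
        rcases (pvVisit word prefixes s e).2.1 <;>
          rcases (pvVisit word prefixes s e).2.2.1 <;>
            rcases (pvVisit word prefixes s e).2.2.2 <;>
              simp [List.flatMap_cons]

-- ===== VERDICT (by name: the statement is the Claim_ definition above) =====
theorem get_prefixes_from_list_spec : Claim_equal_get_prefixes_from_list := by
  intro word prefixes start end_ _ _
  unfold Spec_get_prefixes_from_list get_prefixes_from_list_alt
  rw [gpB_eq word prefixes _ [(start, end_)] [] le_rfl]
  simp
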